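-- pv_equiv track=rewrite | github.com/DREAMFORGE-SYSTEMS/DREAMFORGE-SYSTEMS-Codename.GENESISchain | quantum_blockchain/consensus/quantum_proof_of_work.py | _max_consecutive_chars
-- ===== SOURCE A (Python) =====
-- def _max_consecutive_chars(s: str, char: str) -> int:
--     """
--     Count maximum consecutive occurrences of a character in a string
--
--     Args:
--         s: String to analyze
--         char: Character to count
--
--     Returns:
--         Maximum number of consecutive occurrences
--     """
--     max_count = 0
--     current_count = 0
--
--     for c in s:
--         if c == char:
--             current_count += 1
--             max_count = max(max_count, current_count)
--         else:
--             current_count = 0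
--
--     return max_count
-- ===== SOURCE B (Python) =====
-- def _max_consecutive_chars(s: str, char: str) -> int:
--     """Run-scanning reimplementation: advance over maximal runs of equal
--     characters with two indices; take the max length among runs of `char`."""
--     best = 0
--     i = 0
--     n = len(s)
--     while i < n:
--         j = i
--         while j < n and s[j] == s[i]:
--             j += 1
--         if s[i] == char:
--             best = max(best, j - i)
--         i = j
--     return best
-- ===== Notes on version B (the rewrite author's own statement) =====
-- stated objective: alternative
-- what changed: B scans the string as maximal runs of equal characters with two indices and takes the max length over runs of `char`, instead of A's per-character running counter with an inline max update.
import Mathlib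
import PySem

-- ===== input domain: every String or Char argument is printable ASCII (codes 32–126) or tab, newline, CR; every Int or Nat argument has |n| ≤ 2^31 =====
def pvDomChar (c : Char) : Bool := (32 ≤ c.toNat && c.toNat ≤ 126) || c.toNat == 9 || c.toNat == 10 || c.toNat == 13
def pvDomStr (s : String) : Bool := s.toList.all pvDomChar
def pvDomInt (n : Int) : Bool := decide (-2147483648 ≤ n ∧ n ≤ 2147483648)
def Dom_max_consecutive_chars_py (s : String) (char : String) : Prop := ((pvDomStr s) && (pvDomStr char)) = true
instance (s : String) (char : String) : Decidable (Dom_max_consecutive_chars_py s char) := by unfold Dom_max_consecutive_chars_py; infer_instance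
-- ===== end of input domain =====

-- B replaces A's per-character counter+max scan by a two-index maximal-run scan
-- (filtered max over run lengths); same O(n) cost, different decomposition.

-- ===== PORT A =====
-- for c in s: running counter of the current streak, max updated on each match
def max_consecutive_chars_py (s : String) (char : String) : Int :=
  (s.toList.foldl
    (fun (st : Int × Int) c =>
      if [c] = char.toList then (max st.1 (st.2 + 1), st.2 + 1) else (st.1, 0))
    (0, 0)).1

-- ===== PORT B =====
-- inner while loop: j advances to the end of the maximal run of s[i]; the run
-- has length (takeWhile (= c) cs).length + 1 counting the head c itself
def altLoop (ch : List Char) : List Char → Int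
  | [] => 0
  | c :: cs =>
    let n := (cs.takeWhile (fun d => d = c)).length
    let best := altLoop ch (cs.drop n)
    if ch = [c] then max best ((n : Int) + 1) else best
termination_by l => l.length
decreasing_by
  simp only [List.length_drop, List.length_cons]
  omega

def max_consecutive_chars_py_alt (s : String) (char : String) : Int :=
  altLoop char.toList s.toList

-- ===== PRECONDITION & SPEC =====
def Spec_max_consecutive_chars_py (s : String) (char : String) (out : Int) : Prop := out = max_consecutive_chars_py_alt s char
instance (s : String) (char : String) (out : Int) : Decidable (Spec_max_consecutive_chars_py s char out) := by unfold Spec_max_consecutive_chars_py; infer_instance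

-- ===== CLAIM (what is proved, stated in full; the proofs are below) =====
def Claim_equal_max_consecutive_chars_py : Prop := ∀ (s : String) (char : String), Dom_max_consecutive_chars_py s char → Spec_max_consecutive_chars_py s char (max_consecutive_chars_py s char)

-- ===== LEMMAS AND PROOFS =====

-- common characterisation: best streak value reachable with current streak `cur`
def hAux (ch : List Char) (cur : Int) : List Char → Int
  | [] => 0
  | c :: cs => if ch = [c] then max (cur + 1) (hAux ch (cur + 1) cs) else hAux ch 0 cs

theorem hAux_nonneg (ch : List Char) (l : List Char) : ∀ cur, 0 ≤ hAux ch cur l := by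
  induction l with
  | nil => intro cur; simp [hAux]
  | cons c cs ih =>
    intro cur
    rw [hAux]
    by_cases h : ch = [c]
    · rw [if_pos h]; exact le_trans (ih _) (le_max_right _ _)
    · rw [if_neg h]; exact ih _

theorem foldl_eq_hAux (ch : List Char) (l : List Char) :
    ∀ (m cur : Int), 0 ≤ m →
      (l.foldl
        (fun (st : Int × Int) c =>
          if [c] = ch then (max st.1 (st.2 + 1), st.2 + 1) else (st.1, 0))
        (m, cur)).1 = max m (hAux ch cur l) := by
  induction l with
  | nil => intro m cur hm; simp [hAux, max_eq_left hm]
  | cons c cs ih =>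
    intro m cur hm
    simp only [List.foldl_cons]
    rw [hAux]
    by_cases h : ch = [c]
    · rw [if_pos h, if_pos h.symm]
      rw [ih _ _ (le_trans hm (le_max_left _ _)), max_assoc]
    · rw [if_neg h, if_neg (fun hh => h hh.symm)]
      exact ih _ _ hm

-- streak is irrelevant when the head does not match
theorem hAux_head_ne (ch : List Char) (c : Char) (cs : List Char) (h : ch ≠ [c]) :
    ∀ cur, hAux ch cur (c :: cs) = hAux ch 0 cs := by
  intro cur; rw [hAux, if_neg h]

-- skipping a non-matching run changes nothing
theorem hAux_skip_run (ch : List Char) (c : Char) (h : ch ≠ [c]) :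
    ∀ (cs : List Char),
      hAux ch 0 cs = hAux ch 0 (cs.drop (cs.takeWhile (fun d => d = c)).length) := by
  intro cs
  induction cs with
  | nil => simp
  | cons d ds ih =>
    by_cases hd : d = c
    · subst hd
      simp only [List.takeWhile_cons, decide_true, if_true, List.length_cons, List.drop_succ_cons]
      rw [hAux_head_ne ch d ds h]
      exact ih
    · simp [hd]

-- absorbing a matching run: the streak grows by the whole run
theorem hAux_run (ch : List Char) (c : Char) (h : ch = [c]) :
    ∀ (cs : List Char) (cur : Int), 0 ≤ cur →
      hAux ch cur (c :: cs) =
        max (cur + 1 + (cs.takeWhile (fun d => d = c)).length)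
            (hAux ch 0 (cs.drop (cs.takeWhile (fun d => d = c)).length)) := by
  intro cs
  induction cs with
  | nil =>
    intro cur hcur
    rw [hAux, if_pos h, hAux]
    simp only [List.takeWhile_nil, List.length_nil, List.drop_nil, hAux]
    norm_num
  | cons d ds ih =>
    intro cur hcur
    by_cases hd : d = c
    · subst hd
      simp only [List.takeWhile_cons, decide_true, if_true]
      rw [hAux, if_pos h, ih (cur + 1) (by omega)]
      rw [← max_assoc]
      congr 1
      rw [max_eq_right (by omega)]
      push_cast [List.length_cons]; ring
    · have hne : ch ≠ [d] := by
        rw [h]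
        exact fun hh => hd ((List.cons.injEq c [] d [] ▸ hh : c = d ∧ ([] : List Char) = []).1).symm
      simp only [List.takeWhile_cons, hd, decide_false, Bool.false_eq_true, if_false,
        List.length_nil, List.drop_zero]
      rw [hAux, if_pos h, hAux_head_ne ch d ds hne, hAux_head_ne ch d ds hne]
      norm_num

theorem altLoop_eq_hAux (ch : List Char) : ∀ (l : List Char), altLoop ch l = hAux ch 0 l := by
  intro l
  induction l using altLoop.induct ch with
  | case1 => rw [altLoop, hAux]
  | case2 c cs n h ih =>
    rw [altLoop]
    simp only [if_pos h]
    rw [ih, hAux_run ch c h cs 0 le_rfl, max_comm]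
    congr 1
    push_cast
    ring
  | case3 c cs n h ih =>
    rw [altLoop]
    simp only [if_neg h]
    rw [ih, hAux_head_ne ch c cs h, hAux_skip_run ch c h cs]
-- ===== VERDICT (by name: the statement is the Claim_ definition above) =====
theorem max_consecutive_chars_py_spec : Claim_equal_max_consecutive_chars_py := by
  intro s char _
  unfold Spec_max_consecutive_chars_py max_consecutive_chars_py max_consecutive_chars_py_alt
  rw [foldl_eq_hAux char.toList s.toList 0 0 le_rfl, altLoop_eq_hAux,
      max_eq_right (hAux_nonneg _ _ _)]
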